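-- pv_equiv track=rewrite | github.com/dqx-translation-project/dqxclarity | app/common/translate.py | __add_line_endings
-- ===== SOURCE A (Python) =====
-- def __add_line_endings(text: str) -> str:
--     """Adds <br> flags every 3 lines to a string. Used to break up the text
--     in a dialog window.
--
--     :param text: Text to add the <br> tags to.
--     :returns: A new string with the text broken up by <br> tags.
--     """
--     count_list = [ i for i in range(3, 500, 4) ] # 500 is arbitrary, but we should never hit this.
--     split_text = text.split("\n")
--     try:
--         for i in count_list:
--             _ = split_text[i]
--             split_text.insert(i, "<br>")
--     except IndexError:
--         split_text = [ x for x in split_text if x ]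
--         output = "\n".join(split_text)
--         return output
-- ===== SOURCE B (Python) =====
-- def __add_line_endings(text: str) -> str:
--     """Adds <br> flags every 3 lines to a string (chunked single pass)."""
--     lines = text.split("\n")
--     out = []
--     for i in range(0, len(lines), 3):
--         if i:
--             out.append("<br>")
--         out.extend(l for l in lines[i:i+3] if l)
--     return "\n".join(out)
-- ===== Notes on version B (the rewrite author's own statement) =====
-- stated objective: simpler
-- what changed: Replaces the try/except IndexError loop of repeated list.insert calls (which mutates the list while indexing into it at positions 3,7,11,...) with a single forward pass over chunks of 3 lines, appending the break tag between chunks and skipping empty lines as it goes.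
import Mathlib
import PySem

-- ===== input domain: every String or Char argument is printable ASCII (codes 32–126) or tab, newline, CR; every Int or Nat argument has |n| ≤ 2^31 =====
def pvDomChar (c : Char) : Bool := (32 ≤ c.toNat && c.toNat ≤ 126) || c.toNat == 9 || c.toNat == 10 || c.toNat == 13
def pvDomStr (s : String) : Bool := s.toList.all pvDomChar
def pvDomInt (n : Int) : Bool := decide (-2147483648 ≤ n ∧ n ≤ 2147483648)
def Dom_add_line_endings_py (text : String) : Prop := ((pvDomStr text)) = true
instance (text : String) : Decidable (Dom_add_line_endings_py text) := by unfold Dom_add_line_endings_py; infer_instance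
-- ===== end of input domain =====

-- B replaces A's try/except IndexError loop of repeated list.insert calls with one
-- forward pass over chunks of 3 lines (simpler decomposition; return values agree on Pre_).

-- ===== PORT A =====
-- the 'for i in count_list: _ = split_text[i]; split_text.insert(i, "<br>")' loop:
-- 'none' = the loop ran off the end of count_list (Python then returns None),
-- 'some xs' = an IndexError was caught with the list in state xs.
def pvLoopA (is : List Int) (xs : List String) : Option (List String) :=
  match is with
  | [] => none
  | i :: rest =>
    match PySem.List.pyGet? xs i with
    | none => some xs
    | some _ => pvLoopA rest (PySem.List.insert xs i "<br>")

def add_line_endings_py (text : String) : String :=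
  let count_list := PySem.List.pyRange 3 500 4
  let split_text := (PySem.Str.split? text "\n").getD []
  match pvLoopA count_list split_text with
  | some st => PySem.Str.join "\n" (st.filter (fun x => x != ""))
  | none => ""   -- Python falls off the function and returns None here; excluded by Pre_

-- ===== PORT B =====
def add_line_endings_py_alt (text : String) : String :=
  let lines := (PySem.Str.split? text "\n").getD []
  let out := (PySem.List.pyRange 0 (lines.length : Int) 3).foldl
    (fun acc i =>
      (if i ≠ 0 then acc ++ ["<br>"] else acc) ++
        (PySem.List.slice lines (some i) (some (i + 3))).filter (fun x => x != "")) []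
  PySem.Str.join "\n" out

-- ===== PRECONDITION & SPEC =====
-- Pre_ excludes texts with 376 or more lines: there A's loop exhausts count_list without
-- an IndexError and the Python function falls through, returning None instead of a str.
def Pre_add_line_endings_py (text : String) : Prop :=
  ((PySem.Str.split? text "\n").getD []).length ≤ 375
instance (text : String) : Decidable (Pre_add_line_endings_py text) := by
  unfold Pre_add_line_endings_py; infer_instance

def pvWitness_add_line_endings_py : String := "a\nb\nc\nd\n\ne"

def Spec_add_line_endings_py (text : String) (out : String) : Prop := out = add_line_endings_py_alt text
instance (text : String) (out : String) : Decidable (Spec_add_line_endings_py text out) := by unfold Spec_add_line_endings_py; infer_instance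

-- ===== CLAIM (what is proved, stated in full; the proofs are below) =====
def Claim_equal_add_line_endings_py : Prop := ∀ (text : String), Dom_add_line_endings_py text → Pre_add_line_endings_py text → Spec_add_line_endings_py text (add_line_endings_py text)

-- ===== LEMMAS AND PROOFS =====

-- the list both sides build before joining: the original lines with "<br>"
-- inserted before every third original position
def pvWeave (xs : List String) : List String :=
  if xs.length ≤ 3 then xs
  else xs.take 3 ++ "<br>" :: pvWeave (xs.drop 3)
termination_by xs.length
decreasing_by simp; omega

lemma pvRange_A : PySem.List.pyRange 3 500 4 = (List.range 125).map (fun j : Nat => (3 : Int) + 4 * (j : Int)) := by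
  rw [PySem.List.pyRange_of_pos 3 500 (by norm_num)]
  have h : (if (3:Int) < 500 then (((500:Int) - 3 + 4 - 1) / 4).toNat else 0) = 125 := by decide
  rw [h]

lemma pyGet?_shift (p xs : List String) (i : Int) (hi : 0 ≤ i) (hp : p.length = 4) :
    PySem.List.pyGet? (p ++ xs) (i + 4) = PySem.List.pyGet? xs i := by
  rw [PySem.List.pyGet?_of_nonneg _ (by omega : (0:Int) ≤ i + 4),
      PySem.List.pyGet?_of_nonneg _ hi]
  rw [List.getElem?_append_right (by omega)]
  congr 1
  omega

lemma pvLoopA_shift (is : List Int) (h0 : ∀ i ∈ is, 0 ≤ i) (p xs : List String)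
    (hp : p.length = 4) :
    pvLoopA (is.map (· + 4)) (p ++ xs) = (pvLoopA is xs).map (p ++ ·) := by
  induction is generalizing xs with
  | nil => simp [pvLoopA]
  | cons i rest ih =>
    have hi : 0 ≤ i := h0 i (by simp)
    simp only [List.map_cons, pvLoopA]
    rw [pyGet?_shift p xs i hi hp]
    cases hg : PySem.List.pyGet? xs i with
    | none => simp
    | some v =>
      have hlt : i.toNat < xs.length := by
        by_contra h
        rw [PySem.List.pyGet?_of_nonneg _ hi] at hg
        simp [List.getElem?_eq_none (by omega : xs.length ≤ i.toNat)] at hg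
      have hins : PySem.List.insert (p ++ xs) (i + 4) "<br>" = p ++ PySem.List.insert xs i "<br>" := by
        have h1 : (i + 4) = ((i.toNat + 4 : Nat) : Int) := by omega
        have h2 : i = ((i.toNat : Nat) : Int) := by omega
        rw [h1, h2, PySem.List.insert_natCast _ _ _ (by simp [hp]; omega),
            PySem.List.insert_natCast _ _ _ (by omega)]
        have e1 : i.toNat + 4 = p.length + i.toNat := by omega
        simp only [Int.toNat_natCast]
        rw [e1, List.take_append, List.drop_append]
        have t1 : List.take (p.length + i.toNat) p = p := List.take_of_length_le (by omega)
        have t2 : List.drop (p.length + i.toNat) p = ([] : List String) := List.drop_eq_nil_of_le (by omega)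
        rw [t1, t2]
        simp
      rw [hins, ih (fun j hj => h0 j (by simp [hj]))]

lemma pvLoopA_weave (k : Nat) (xs : List String) (hk : 1 ≤ k) (hlen : xs.length ≤ 3 * k) :
    pvLoopA ((List.range k).map (fun j : Nat => (3 : Int) + 4 * (j : Int))) xs = some (pvWeave xs) := by
  induction k generalizing xs with
  | zero => omega
  | succ m ih =>
    rw [List.range_succ_eq_map, List.map_cons, List.map_map]
    have hmap : (List.range m).map ((fun j : Nat => (3 : Int) + 4 * (j : Int)) ∘ Nat.succ)
        = ((List.range m).map (fun j : Nat => (3 : Int) + 4 * (j : Int))).map (· + 4) := by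
      rw [List.map_map]
      apply List.map_congr_left
      intro j _
      simp [Nat.succ_eq_add_one]
      ring
    rw [hmap]
    by_cases hle : xs.length ≤ 3
    · have hg : PySem.List.pyGet? xs ((3:Int) + 4 * ((0:Nat) : Int)) = none := by
        rw [PySem.List.pyGet?_of_nonneg _ (by norm_num)]
        simp
        omega
      simp only [pvLoopA, hg]
      rw [pvWeave]
      simp [hle]
    · have hg : ∃ v, PySem.List.pyGet? xs ((3:Int) + 4 * ((0:Nat) : Int)) = some v := by
        rw [PySem.List.pyGet?_of_nonneg _ (by norm_num)]
        norm_num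
        exact ⟨_, List.getElem?_eq_getElem (by omega)⟩
      obtain ⟨v, hg⟩ := hg
      simp only [pvLoopA, hg]
      have hins : PySem.List.insert xs ((3:Int) + 4 * ((0:Nat) : Int)) "<br>"
          = (xs.take 3 ++ ["<br>"]) ++ xs.drop 3 := by
        norm_num
        exact PySem.List.insert_ofNat xs 3 "<br>" (by omega)
      rw [hins, pvLoopA_shift _ (by
            intro i hi
            simp only [List.mem_map] at hi
            obtain ⟨j, _, rfl⟩ := hi
            positivity) _ _ (by simp [List.length_take]; omega)]
      rw [ih (xs.drop 3) (by omega) (by simp; omega)]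
      conv_rhs => rw [pvWeave]
      simp [hle]


lemma pvRange_small (n : Int) (h1 : 0 < n) (h2 : n ≤ 3) :
    PySem.List.pyRange 0 n 3 = [0] := by
  rw [PySem.List.pyRange_of_pos 0 n (by norm_num)]
  have hc : (if (0:Int) < n then ((n - 0 + 3 - 1) / 3).toNat else 0) = 1 := by
    rw [if_pos h1]; omega
  rw [hc]
  simp

lemma pvRange_step (n : Int) (h : 3 < n) :
    PySem.List.pyRange 0 n 3 = 0 :: (PySem.List.pyRange 0 (n - 3) 3).map (· + 3) := by
  rw [PySem.List.pyRange_of_pos 0 n (by norm_num),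
      PySem.List.pyRange_of_pos 0 (n - 3) (by norm_num)]
  have hc : (if (0:Int) < n then ((n - 0 + 3 - 1) / 3).toNat else 0)
      = (if (0:Int) < n - 3 then ((n - 3 - 0 + 3 - 1) / 3).toNat else 0) + 1 := by
    rw [if_pos (by omega), if_pos (by omega)]; omega
  rw [hc, List.range_succ_eq_map, List.map_cons, List.map_map, List.map_map]
  norm_num
  intro a _
  ring

lemma pvSlice_shift (xs : List String) (i : Int) (hi : 0 ≤ i) :
    PySem.List.slice xs (some (i + 3)) (some (i + 3 + 3))
      = PySem.List.slice (xs.drop 3) (some i) (some (i + 3)) := by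
  have e1 : (i + 3).toNat = i.toNat + 3 := by omega
  have e2 : (i + 3 + 3).toNat = i.toNat + 6 := by omega
  rw [PySem.List.slice_toNat _ (by omega) (by omega),
      PySem.List.slice_toNat _ hi (by omega), List.drop_drop, e1, e2,
      Nat.add_comm 3 i.toNat]
  congr 1
  omega

-- shift: the chunks at indices 3,6,… of lines are the chunks at 0,3,… of lines.drop 3
lemma pvB_congr (lines : List String) (r : List Int) (h0 : ∀ i ∈ r, 0 ≤ i) :
    (r.map (· + 3)).flatMap
        (fun i => ["<br>"] ++ (PySem.List.slice lines (some i) (some (i + 3))).filter (fun x => x != ""))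
      = r.flatMap
        (fun i => ["<br>"] ++ (PySem.List.slice (lines.drop 3) (some i) (some (i + 3))).filter (fun x => x != "")) := by
  rw [List.flatMap_map]
  rw [List.flatMap_def, List.flatMap_def]
  congr 1
  apply List.map_congr_left
  intro i hi
  rw [pvSlice_shift lines i (h0 i hi)]

lemma pvB_flat (lines : List String) (h : lines ≠ []) :
    (PySem.List.pyRange 0 (lines.length : Int) 3).flatMap
        (fun i => ["<br>"] ++ (PySem.List.slice lines (some i) (some (i + 3))).filter (fun x => x != ""))
      = "<br>" :: (pvWeave lines).filter (fun x => x != "") := by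
  by_cases hle : lines.length ≤ 3
  · rw [pvRange_small _ (by simp [List.length_pos_iff, h]) (by exact_mod_cast hle)]
    simp only [List.flatMap_cons, List.flatMap_nil, List.append_nil]
    rw [PySem.List.slice_toNat _ le_rfl (by norm_num)]
    simp [List.take_of_length_le hle]
    rw [pvWeave]
    simp [hle]
  · rw [pvRange_step _ (by omega)]
    simp only [List.flatMap_cons]
    have hlen : ((lines.length : Int) - 3) = ((lines.drop 3).length : Int) := by
      simp; omega
    rw [hlen, pvB_congr lines _ (by
        intro i hi
        rw [PySem.List.mem_pyRange_iff_of_pos (by norm_num)] at hi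
        exact hi.1)]
    rw [pvB_flat (lines.drop 3) (by simp [List.length_pos_iff.symm]; omega)]
    rw [PySem.List.slice_toNat _ le_rfl (by norm_num)]
    conv_rhs => rw [pvWeave]
    simp only [if_neg hle, List.filter_append, List.filter_cons]
    simp
termination_by lines.length
decreasing_by simp; omega

lemma pvB_fold (lines : List String) :
    (PySem.List.pyRange 0 (lines.length : Int) 3).foldl
      (fun acc i =>
        (if i ≠ 0 then acc ++ ["<br>"] else acc) ++
          (PySem.List.slice lines (some i) (some (i + 3))).filter (fun x => x != "")) []
    = (pvWeave lines).filter (fun x => x != "") := by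
  rw [PySem.List.foldl_congr_mem _ _
      (fun acc i => acc ++ ((if i ≠ 0 then ["<br>"] else []) ++
          (PySem.List.slice lines (some i) (some (i + 3))).filter (fun x => x != ""))) _
      (by
        intro acc i _
        by_cases h : i = 0 <;> simp [h])]
  rw [PySem.List.foldl_append_eq_flatMap]
  simp only [List.nil_append]
  by_cases h : lines = []
  · subst h
    simp [pvWeave, PySem.List.pyRange_of_pos 0 0 (by norm_num : (0:Int) < 3)]
  · by_cases hle : lines.length ≤ 3
    · rw [pvRange_small _ (by simp [List.length_pos_iff, h]) (by exact_mod_cast hle)]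
      simp only [List.flatMap_cons, List.flatMap_nil, List.append_nil, if_neg (by norm_num : ¬(0:Int) ≠ 0)]
      rw [PySem.List.slice_toNat _ le_rfl (by norm_num)]
      simp [List.take_of_length_le hle]
      rw [pvWeave]
      simp [hle]
    · rw [pvRange_step _ (by omega)]
      simp only [List.flatMap_cons, if_neg (by norm_num : ¬(0:Int) ≠ 0)]
      -- turn the conditional body into the unconditional one on the shifted range
      have hcond : ((PySem.List.pyRange 0 ((lines.length : Int) - 3) 3).map (· + 3)).flatMap
          (fun i => (if i ≠ 0 then ["<br>"] else []) ++
            (PySem.List.slice lines (some i) (some (i + 3))).filter (fun x => x != ""))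
          = ((PySem.List.pyRange 0 ((lines.length : Int) - 3) 3).map (· + 3)).flatMap
          (fun i => ["<br>"] ++
            (PySem.List.slice lines (some i) (some (i + 3))).filter (fun x => x != "")) := by
        rw [List.flatMap_def, List.flatMap_def]
        congr 1
        apply List.map_congr_left
        intro i hi
        simp only [List.mem_map] at hi
        obtain ⟨j, hj, rfl⟩ := hi
        rw [PySem.List.mem_pyRange_iff_of_pos (by norm_num)] at hj
        rw [if_pos (by omega)]
      rw [hcond]
      have hlen : ((lines.length : Int) - 3) = ((lines.drop 3).length : Int) := by simp; omega
      rw [hlen, pvB_congr lines _ (by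
          intro i hi
          rw [PySem.List.mem_pyRange_iff_of_pos (by norm_num)] at hi
          exact hi.1)]
      rw [pvB_flat (lines.drop 3) (by simp [List.length_pos_iff.symm]; omega)]
      rw [PySem.List.slice_toNat _ le_rfl (by norm_num)]
      conv_rhs => rw [pvWeave]
      simp only [if_neg hle, List.filter_append, List.filter_cons]
      simp

-- ===== VERDICT (by name: the statement is the Claim_ definition above) =====
theorem add_line_endings_py_spec : Claim_equal_add_line_endings_py := by
  intro text _hdom hpre
  unfold Spec_add_line_endings_py add_line_endings_py add_line_endings_py_alt
  unfold Pre_add_line_endings_py at hpre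
  simp only [pvRange_A]
  rw [pvLoopA_weave 125 _ (by norm_num) (by omega)]
  simp only [pvB_fold]
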